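-- pv_equiv track=rewrite | github.com/denvadim17/OIP | dz4/compute_tfidf.py | build_lemma_document_frequency
-- ===== SOURCE A (Python) =====
-- from collections import Counter, defaultdict
-- from typing import Dict, List, Set, Tuple
--
-- def build_lemma_document_frequency(
--     doc_to_counts: Dict[str, Counter], lemma_map: Dict[str, Set[str]]
-- ) -> Dict[str, int]:
--     lemma_df: Dict[str, int] = {}
--     for lemma, forms in lemma_map.items():
--         df = 0
--         for counts in doc_to_counts.values():
--             if any(form in counts for form in forms):
--                 df += 1
--         lemma_df[lemma] = df
--     return lemma_df
-- ===== SOURCE B (Python) =====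
-- from collections import Counter
--
--
-- def build_lemma_document_frequency(doc_to_counts, lemma_map):
--     # Invert forms -> lemmas once, then a single pass over the documents.
--     inverted = {}
--     for lemma, forms in lemma_map.items():
--         for form in forms:
--             inverted.setdefault(form, []).append(lemma)
--     hits = []
--     for counts in doc_to_counts.values():
--         seen = set()
--         for form in counts:
--             seen.update(inverted.get(form, ()))
--         hits.extend(seen)
--     c = Counter(hits)
--     return {lemma: c[lemma] for lemma in lemma_map}
-- ===== Notes on version B (the rewrite author's own statement) =====
-- stated objective: faster
-- what changed: Instead of scanning every document for every lemma, B inverts the form-to-lemma map once, makes a single pass over the documents collecting the set of lemmas each document hits, and reads the per-lemma document counts off a Counter.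
import Mathlib
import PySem

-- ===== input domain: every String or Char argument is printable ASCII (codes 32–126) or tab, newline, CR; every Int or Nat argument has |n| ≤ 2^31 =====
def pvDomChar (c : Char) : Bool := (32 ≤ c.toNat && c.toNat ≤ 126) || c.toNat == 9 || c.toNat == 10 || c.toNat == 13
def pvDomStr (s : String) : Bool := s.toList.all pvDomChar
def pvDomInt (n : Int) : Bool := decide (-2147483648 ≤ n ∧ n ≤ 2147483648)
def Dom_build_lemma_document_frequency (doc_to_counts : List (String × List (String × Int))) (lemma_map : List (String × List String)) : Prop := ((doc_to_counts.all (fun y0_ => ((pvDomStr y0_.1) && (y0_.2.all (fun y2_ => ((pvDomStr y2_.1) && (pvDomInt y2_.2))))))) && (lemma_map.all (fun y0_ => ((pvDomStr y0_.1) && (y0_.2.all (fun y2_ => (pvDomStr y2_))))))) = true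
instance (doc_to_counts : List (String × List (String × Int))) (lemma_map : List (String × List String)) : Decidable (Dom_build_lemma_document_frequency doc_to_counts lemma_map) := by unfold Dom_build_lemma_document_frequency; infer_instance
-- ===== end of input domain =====

-- B replaces A's per-lemma scan of all documents by one inverted forms→lemmas index and a
-- single pass over the documents (asymptotically faster); equality proved for lemma maps
-- with pairwise-distinct lemma keys (the only ones a Python dict can represent).


-- ===== PORT A =====
def build_lemma_document_frequency (doc_to_counts : List (String × List (String × Int))) (lemma_map : List (String × List String)) : List (String × Int) :=
  -- lemma_df = {}; for lemma, forms in lemma_map.items(): df = 0; for counts in ...: if any(...): df += 1; lemma_df[lemma] = df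
  (lemma_map.foldl
    (fun (lemma_df : PySem.Dict String Int) p =>
      lemma_df.insert p.1
        (doc_to_counts.foldl
          (fun df d =>
            if p.2.any (fun form => PySem.Dict.contains ⟨d.2⟩ form) then df + 1 else df)
          0))
    PySem.Dict.empty).items

-- ===== PORT B =====
def build_lemma_document_frequency_alt (doc_to_counts : List (String × List (String × Int))) (lemma_map : List (String × List String)) : List (String × Int) :=
  -- inverted = {}; for lemma, forms in lemma_map.items(): for form in forms: inverted.setdefault(form, []).append(lemma)
  let inverted : PySem.Dict String (List String) :=
    lemma_map.foldl
      (fun inv p => p.2.foldl (fun inv form => inv.modify form [] (fun l => l ++ [p.1])) inv)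
      PySem.Dict.empty
  -- hits = []; for counts in ...: seen = set(); for form in counts: seen.update(inverted.get(form, ())); hits.extend(seen)
  let hits : List String :=
    doc_to_counts.foldl
      (fun hits d =>
        hits ++ d.2.foldl (fun (s : PySem.Set String) kv => s.update (inverted.getD kv.1 [])) PySem.Set.empty)
      []
  -- c = Counter(hits); return {lemma: c[lemma] for lemma in lemma_map}
  let c : PySem.Dict String Int := PySem.Dict.counter hits
  (lemma_map.foldl
    (fun (acc : PySem.Dict String Int) p => acc.insert p.1 (c.getD p.1 0))
    PySem.Dict.empty).items

-- ===== PRECONDITION & SPEC =====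
-- Pre_ excludes association lists whose lemma keys repeat: no Python dict can represent them,
-- so A's behaviour there is not defined by the source (dict construction would collapse them).
def Pre_build_lemma_document_frequency (doc_to_counts : List (String × List (String × Int))) (lemma_map : List (String × List String)) : Prop :=
  (lemma_map.map Prod.fst).Nodup
instance (doc_to_counts : List (String × List (String × Int))) (lemma_map : List (String × List String)) : Decidable (Pre_build_lemma_document_frequency doc_to_counts lemma_map) := by unfold Pre_build_lemma_document_frequency; infer_instance

def pvWitness_build_lemma_document_frequency : (List (String × List (String × Int))) × (List (String × List String)) :=
  ([("d1", [("a", 1), ("c", 2)]), ("d2", [("b", 1)])], [("x", ["a", "b"]), ("y", ["c"]), ("z", [])])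

def Spec_build_lemma_document_frequency (doc_to_counts : List (String × List (String × Int))) (lemma_map : List (String × List String)) (out : List (String × Int)) : Prop := out = build_lemma_document_frequency_alt doc_to_counts lemma_map
instance (doc_to_counts : List (String × List (String × Int))) (lemma_map : List (String × List String)) (out : List (String × Int)) : Decidable (Spec_build_lemma_document_frequency doc_to_counts lemma_map out) := by unfold Spec_build_lemma_document_frequency; infer_instance

-- ===== CLAIM (what is proved, stated in full; the proofs are below) =====
def Claim_equal_build_lemma_document_frequency : Prop := ∀ (doc_to_counts : List (String × List (String × Int))) (lemma_map : List (String × List String)), Dom_build_lemma_document_frequency doc_to_counts lemma_map → Pre_build_lemma_document_frequency doc_to_counts lemma_map → Spec_build_lemma_document_frequency doc_to_counts lemma_map (build_lemma_document_frequency doc_to_counts lemma_map)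

-- ===== LEMMAS AND PROOFS =====

-- Folding fresh-key inserts into a dict appends the corresponding pairs to its items.
theorem pv_insertFold_items (g : String × List String → Int) :
    ∀ (lm : List (String × List String)) (d : PySem.Dict String Int),
      (lm.map Prod.fst).Nodup → (∀ p ∈ lm, d.contains p.1 = false) →
      (lm.foldl (fun d p => d.insert p.1 (g p)) d).items
        = d.items ++ lm.map (fun p => (p.1, g p)) := by
  intro lm
  induction lm with
  | nil => intro d _ _; simp
  | cons p lm ih =>
    intro d hn hf
    simp only [List.map_cons, List.nodup_cons, List.mem_map] at hn
    simp only [List.foldl_cons, List.map_cons]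
    rw [ih _ hn.2 (fun q hq => by
      rw [PySem.Dict.contains_insert]
      have hne : (q.1 == p.1) = false := by
        simp only [beq_eq_false_iff_ne, ne_eq]
        intro h
        exact hn.1 ⟨q, hq, h⟩
      rw [hne, Bool.false_or]
      exact hf q (List.mem_cons_of_mem _ hq))]
    rw [PySem.Dict.items_insert_of_not_contains _ _ (hf p (List.mem_cons_self ..))]
    simp

-- Membership in one inverted-index entry after registering one lemma's forms.
theorem pv_inv_inner (lem : String) (forms : List String) :
    ∀ (inv : PySem.Dict String (List String)) (f ℓ : String),
      ℓ ∈ (forms.foldl (fun inv form => inv.modify form [] (fun l => l ++ [lem])) inv).getD f []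
        ↔ ℓ ∈ inv.getD f [] ∨ (ℓ = lem ∧ f ∈ forms) := by
  induction forms with
  | nil => simp
  | cons fo forms ih =>
    intro inv f ℓ
    simp only [List.foldl_cons]
    rw [ih, PySem.Dict.getD_modify]
    by_cases hf : f = fo
    · subst hf; simp [List.mem_append]; tauto
    · simp [hf]

-- Membership in an inverted-index entry after registering the whole lemma map.
theorem pv_inv_outer :
    ∀ (lm : List (String × List String)) (inv : PySem.Dict String (List String)) (f ℓ : String),
      ℓ ∈ (lm.foldl (fun inv p => p.2.foldl (fun inv form => inv.modify form [] (fun l => l ++ [p.1])) inv) inv).getD f []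
        ↔ ℓ ∈ inv.getD f [] ∨ ∃ q ∈ lm, ℓ = q.1 ∧ f ∈ q.2 := by
  intro lm
  induction lm with
  | nil => simp
  | cons p lm ih =>
    intro inv f ℓ
    simp only [List.foldl_cons]
    rw [ih, pv_inv_inner]
    simp only [List.mem_cons]
    constructor
    · rintro (⟨h | ⟨rfl, hf⟩⟩ | ⟨q, hq, rfl, hf⟩)
      · exact Or.inl h
      · exact Or.inr ⟨p, Or.inl rfl, rfl, hf⟩
      · exact Or.inr ⟨q, Or.inr hq, rfl, hf⟩
    · rintro (h | ⟨q, (rfl | hq), rfl, hf⟩)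
      · exact Or.inl (Or.inl h)
      · exact Or.inl (Or.inr ⟨rfl, hf⟩)
      · exact Or.inr ⟨q, hq, rfl, hf⟩

-- The per-document set of hit lemmas: membership.
theorem pv_seen_mem (inverted : PySem.Dict String (List String)) :
    ∀ (entries : List (String × Int)) (s : PySem.Set String) (ℓ : String),
      ℓ ∈ entries.foldl (fun (s : PySem.Set String) kv => s.update (inverted.getD kv.1 [])) s
        ↔ ℓ ∈ s ∨ ∃ kv ∈ entries, ℓ ∈ inverted.getD kv.1 [] := by
  intro entries
  induction entries with
  | nil => simp
  | cons kv entries ih =>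
    intro s ℓ
    simp only [List.foldl_cons]
    rw [ih, PySem.Set.mem_update]
    simp only [List.mem_cons]
    constructor
    · rintro (⟨h | h⟩ | ⟨kv', h1, h2⟩)
      · exact Or.inl h
      · exact Or.inr ⟨kv, Or.inl rfl, h⟩
      · exact Or.inr ⟨kv', Or.inr h1, h2⟩
    · rintro (h | ⟨kv', (rfl | h1), h2⟩)
      · exact Or.inl (Or.inl h)
      · exact Or.inl (Or.inr h2)
      · exact Or.inr ⟨kv', h1, h2⟩

-- The per-document set of hit lemmas has no duplicates.
theorem pv_seen_nodup (inverted : PySem.Dict String (List String)) :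
    ∀ (entries : List (String × Int)) (s : PySem.Set String), s.Nodup →
      (entries.foldl (fun (s : PySem.Set String) kv => s.update (inverted.getD kv.1 [])) s).Nodup := by
  intro entries
  induction entries with
  | nil => intro s h; simpa using h
  | cons kv entries ih =>
    intro s h
    simp only [List.foldl_cons]
    exact ih _ (PySem.Set.nodup_update _ _ h)

-- Count of one lemma in the concatenated per-document hit sets = number of documents hitting it.
theorem pv_hits_count (seenOf : (String × List (String × Int)) → List String)
    (hnd : ∀ d, (seenOf d).Nodup) :
    ∀ (docs : List (String × List (String × Int))) (h0 : List String) (ℓ : String),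
      List.count ℓ (docs.foldl (fun h d => h ++ seenOf d) h0)
        = List.count ℓ h0 + docs.countP (fun d => decide (ℓ ∈ seenOf d)) := by
  intro docs
  induction docs with
  | nil => simp
  | cons d docs ih =>
    intro h0 ℓ
    simp only [List.foldl_cons, List.countP_cons]
    rw [ih]
    rw [List.count_append]
    by_cases hm : ℓ ∈ seenOf d
    · rw [List.count_eq_one_of_mem (hnd d) hm]
      simp [hm, Nat.add_assoc, Nat.add_comm]
    · rw [List.count_eq_zero_of_not_mem hm]
      simp [hm]

-- ===== VERDICT (by name: the statement is the Claim_ definition above) =====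
theorem build_lemma_document_frequency_spec : Claim_equal_build_lemma_document_frequency := by
  intro docs lm _hDom hPre
  unfold Pre_build_lemma_document_frequency at hPre
  unfold Spec_build_lemma_document_frequency
  unfold build_lemma_document_frequency build_lemma_document_frequency_alt
  simp only []
  rw [pv_insertFold_items _ lm PySem.Dict.empty hPre (fun p _ => PySem.Dict.contains_empty _),
      pv_insertFold_items _ lm PySem.Dict.empty hPre (fun p _ => PySem.Dict.contains_empty _)]
  congr 1
  apply List.map_congr_left
  intro p hp
  simp only [Prod.mk.injEq]
  refine ⟨trivial, ?_⟩
  show (docs.foldl (fun df d => if p.2.any (fun form => PySem.Dict.contains ⟨d.2⟩ form) then df + 1 else df) 0) = _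
  rw [PySem.Dict.getD_counter, PySem.List.foldl_count_if]
  simp only [PySem.Set.empty]
  rw [pv_hits_count _ (fun d => pv_seen_nodup _ _ _ List.nodup_nil)]
  simp only [List.count_nil, Nat.zero_add, Int.zero_add]
  congr 1
  apply List.countP_congr
  intro d _
  simp only [List.any_eq_true, PySem.Dict.contains_mk, decide_eq_true_eq, beq_iff_eq]
  rw [pv_seen_mem]
  simp only [List.not_mem_nil, false_or]
  constructor
  · rintro ⟨form, hform, kv, hkv, rfl⟩
    refine ⟨kv, hkv, ?_⟩
    rw [pv_inv_outer]
    exact Or.inr ⟨p, hp, rfl, hform⟩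
  · rintro ⟨kv, hkv, hmem⟩
    rw [pv_inv_outer] at hmem
    rcases hmem with h | ⟨q, hq, hq1, hf⟩
    · simp [PySem.Dict.getD_empty] at h
    · have : q = p := List.inj_on_of_nodup_map hPre hq hp hq1.symm
      subst this
      exact ⟨kv.1, hf, kv, hkv, rfl⟩
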